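-- pv_equiv track=rewrite | github.com/j-wetherbee/Robbot | util/Utility.py | make_ingredients_string
-- ===== SOURCE A (Python) =====
-- def make_ingredients_string(json):
--     ingredients = [json.get(ing) for ing in json if 'Ingredient' in ing and json.get(ing) is not None]
--     measurements = [json.get(measure) for measure in json if 'Measure' in measure and json.get(measure) is not None]
--
--     if(len(measurements) == 0):
--         return ingredients
--
--     ingredient_list = []
--     for i in range(len(ingredients)):
--         if(i < len(measurements)):
--             ingredient_list.append(measurements[i].strip() + " " + ingredients[i])
--         elif(ingredients[i] == ' '):
--             pass
--         else:
--             ingredient_list.append(ingredients[i])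
--     return ingredient_list
-- ===== SOURCE B (Python) =====
-- def make_ingredients_string(json):
--     ingredients = [json.get(ing) for ing in json if 'Ingredient' in ing and json.get(ing) is not None]
--     measurements = [json.get(measure) for measure in json if 'Measure' in measure and json.get(measure) is not None]
--
--     if not measurements:
--         return ingredients
--
--     def pair(ms, ings):
--         # structural recursion over both lists at once: no indices, no lengths
--         if not ings:
--             return []
--         if ms:
--             return [ms[0].strip() + " " + ings[0]] + pair(ms[1:], ings[1:])
--         rest = pair(ms, ings[1:])
--         if ings[0] == ' ':
--             return rest
--         return [ings[0]] + rest
--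
--     return pair(measurements, ingredients)
-- ===== Notes on version B (the rewrite author's own statement) =====
-- stated objective: alternative
-- what changed: A's indexed for-loop over range(len(ingredients)) with i<len(measurements) comparisons is replaced by a recursive function that consumes the two lists structurally head-by-tail, with no indexing, no len() arithmetic and no appends; the filtering comprehensions and early return are kept.
import Mathlib
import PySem

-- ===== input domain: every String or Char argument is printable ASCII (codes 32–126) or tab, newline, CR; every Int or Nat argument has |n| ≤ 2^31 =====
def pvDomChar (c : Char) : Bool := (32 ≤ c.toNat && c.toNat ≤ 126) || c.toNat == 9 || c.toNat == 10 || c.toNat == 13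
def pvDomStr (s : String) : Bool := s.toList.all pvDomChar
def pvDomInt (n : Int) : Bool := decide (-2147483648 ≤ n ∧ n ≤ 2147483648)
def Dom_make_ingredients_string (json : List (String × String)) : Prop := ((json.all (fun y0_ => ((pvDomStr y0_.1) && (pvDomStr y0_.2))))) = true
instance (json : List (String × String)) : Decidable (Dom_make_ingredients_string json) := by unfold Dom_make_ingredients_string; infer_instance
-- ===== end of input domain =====

-- B replaces A's indexed for-loop by a recursion that consumes the measurement and
-- ingredient lists structurally head-by-tail (objective: alternative; the filtering
-- comprehensions and the empty-measurements early return are kept).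


-- shared by both ports: the comprehension '[json.get(k) for k in json if pat in k and json.get(k) is not None]'
-- (identical source lines in A and in B)
def pvVals (json : List (String × String)) (pat : String) : List String :=
  let d := PySem.Dict.ofList json
  (d.keys.filter (fun k => PySem.Str.isIn pat k && (d.get? k).isSome)).map
    (fun k => (d.get? k).getD "")

-- ===== PORT A =====
-- A's indexed for-loop over range(len(ingredients)), appending to ingredient_list
def aLoop (ings ms : List String) (i : Nat) : List String :=
  if h : i < ings.length then
    (if i < ms.length then [PySem.Str.strip (ms.getD i "") ++ " " ++ ings.getD i ""]
     else if ings.getD i "" = " " then [] else [ings.getD i ""]) ++ aLoop ings ms (i + 1)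
  else []
termination_by ings.length - i

def make_ingredients_string (json : List (String × String)) : List String :=
  let ingredients := pvVals json "Ingredient"
  let measurements := pvVals json "Measure"
  if measurements.length = 0 then ingredients
  else aLoop ingredients measurements 0

-- ===== PORT B =====
-- B's recursive helper 'pair(ms, ings)': structural recursion on the two lists
def bPair : List String → List String → List String
  | _, [] => []
  | m :: ms, ing :: ings => (PySem.Str.strip m ++ " " ++ ing) :: bPair ms ings
  | [], ing :: ings =>
      let rest := bPair [] ings
      if ing = " " then rest else ing :: rest

def make_ingredients_string_alt (json : List (String × String)) : List String :=
  let ingredients := pvVals json "Ingredient"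
  let measurements := pvVals json "Measure"
  if measurements.isEmpty then ingredients
  else bPair measurements ingredients

-- ===== PRECONDITION & SPEC =====
def Spec_make_ingredients_string (json : List (String × String)) (out : List String) : Prop := out = make_ingredients_string_alt json
instance (json : List (String × String)) (out : List String) : Decidable (Spec_make_ingredients_string json out) := by unfold Spec_make_ingredients_string; infer_instance

-- ===== CLAIM (what is proved, stated in full; the proofs are below) =====
def Claim_equal_make_ingredients_string : Prop := ∀ (json : List (String × String)), Dom_make_ingredients_string json → Spec_make_ingredients_string json (make_ingredients_string json)

-- ===== LEMMAS AND PROOFS =====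

-- characterisation of A's indexed loop from position i
lemma aLoop_eq (ings ms : List String) (i : Nat) :
    aLoop ings ms i = bPair (ms.drop i) (ings.drop i) := by
  generalize hn : ings.length - i = n
  induction n generalizing i with
  | zero =>
    have hle : ings.length ≤ i := by omega
    rw [aLoop]
    simp [Nat.not_lt.2 hle, List.drop_eq_nil_of_le hle, bPair]
  | succ n ih =>
    have hi : i < ings.length := by omega
    rw [aLoop, dif_pos hi]
    rw [ih (i + 1) (by omega)]
    have hdi : ings.drop i = ings[i] :: ings.drop (i + 1) :=
      List.drop_eq_getElem_cons hi
    by_cases hm : i < ms.length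
    · have hdm : ms.drop i = ms[i] :: ms.drop (i + 1) :=
        List.drop_eq_getElem_cons hm
      rw [if_pos hm, hdi, hdm]
      simp [bPair, List.getD, List.getElem?_eq_getElem hi, List.getElem?_eq_getElem hm]
    · have hle : ms.length ≤ i := Nat.not_lt.1 hm
      have hdm : ms.drop i = [] := List.drop_eq_nil_of_le hle
      have hdm' : ms.drop (i + 1) = [] := List.drop_eq_nil_of_le (by omega)
      rw [if_neg hm, hdm, hdm', hdi]
      simp only [List.getD, List.getElem?_eq_getElem hi, Option.getD_some, bPair]
      by_cases hsp : ings[i] = " "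
      · simp [hsp]
      · simp [hsp]

-- ===== VERDICT (by name: the statement is the Claim_ definition above) =====
theorem make_ingredients_string_spec : Claim_equal_make_ingredients_string := by
  intro json _
  unfold Spec_make_ingredients_string make_ingredients_string make_ingredients_string_alt
  simp only [List.isEmpty_iff, List.length_eq_zero_iff]
  by_cases h : pvVals json "Measure" = []
  · simp [h]
  · simp only [if_neg h]
    rw [aLoop_eq]
    simp
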